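-- pv_equiv track=rewrite | github.com/haolunc/ARC-RL | reference_solutions/solutions/b2bc3ffd.py | transform
-- ===== SOURCE A (Python) =====
-- def transform(grid):
--
--     h = len(grid)
--     if h == 0:
--         return grid
--     w = len(grid[0])
--
--     out = [[7 for _ in range(w)] for _ in range(h)]
--
--     for r in range(h):
--         for c in range(w):
--             if grid[r][c] == 8:
--                 out[r][c] = 8
--
--     visited = [[False] * w for _ in range(h)]
--
--     dirs = [(-1,0),(1,0),(0,-1),(0,1)]
--
--     for r in range(h):
--         for c in range(w):
--             val = grid[r][c]
--
--             if val != 7 and val != 8 and not visited[r][c]: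
--
--                 stack = [(r, c)]
--                 comp = []
--                 visited[r][c] = True
--                 while stack:
--                     x, y = stack.pop()
--                     comp.append((x, y))
--                     for dx, dy in dirs:
--                         nx, ny = x + dx, y + dy
--                         if 0 <= nx < h and 0 <= ny < w:
--                             if not visited[nx][ny] and grid[nx][ny] == val:
--                                 visited[nx][ny] = True
--                                 stack.append((nx, ny))
--
--                 s = len(comp)
--                 for (x, y) in comp:
--                     nx = x - s
--
--                     if 0 <= nx < h:
--                         out[nx][y] = val
--
--     return out
-- ===== SOURCE B (Python) =====
-- def _paint(out, vc):
--     v, comp = vc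
--     s = len(comp)
--     for (x, y) in comp:
--         if x >= s:
--             out[x - s][y] = v
--     return out
--
--
-- def transform(grid):
--     h = len(grid)
--     if h == 0:
--         return grid
--     w = len(grid[0])
--
--     cells = [(r, c) for r in range(h) for c in range(w)]
--
--     # phase 1: collect the equal-valued components in first-encounter scan order
--     comps = []
--     done = set()
--     for (r, c) in cells:
--         v = grid[r][c]
--         if v != 7 and v != 8 and (r, c) not in done:
--             comp = []
--             frontier = [(r, c)]
--             done.add((r, c))
--             while frontier:
--                 comp = comp + frontier
--                 nxt = []
--                 for (x, y) in frontier: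
--                     for (nx, ny) in ((x - 1, y), (x + 1, y), (x, y - 1), (x, y + 1)):
--                         if 0 <= nx < h and 0 <= ny < w and (nx, ny) not in done and grid[nx][ny] == v:
--                             done.add((nx, ny))
--                             nxt.append((nx, ny))
--                 frontier = nxt
--             comps.append((v, comp))
--
--     # phase 2: base image, then paint each component shifted up by its size
--     out = [[8 if grid[r][c] == 8 else 7 for c in range(w)] for r in range(h)]
--     for vc in comps:
--         out = _paint(out, vc)
--     return out
-- ===== Notes on version B (the rewrite author's own statement) =====
-- stated objective: alternative
-- what changed: A's single fused scan (DFS with an explicit stack and a boolean visited matrix, painting each component as soon as it is found) becomes two separate phases over a flattened cell list: phase 1 collects all components in first-encounter order via a level-by-level BFS frontier over a visited coordinate set, phase 2 builds the 7/8 base image and then paints the collected components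
import Mathlib
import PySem

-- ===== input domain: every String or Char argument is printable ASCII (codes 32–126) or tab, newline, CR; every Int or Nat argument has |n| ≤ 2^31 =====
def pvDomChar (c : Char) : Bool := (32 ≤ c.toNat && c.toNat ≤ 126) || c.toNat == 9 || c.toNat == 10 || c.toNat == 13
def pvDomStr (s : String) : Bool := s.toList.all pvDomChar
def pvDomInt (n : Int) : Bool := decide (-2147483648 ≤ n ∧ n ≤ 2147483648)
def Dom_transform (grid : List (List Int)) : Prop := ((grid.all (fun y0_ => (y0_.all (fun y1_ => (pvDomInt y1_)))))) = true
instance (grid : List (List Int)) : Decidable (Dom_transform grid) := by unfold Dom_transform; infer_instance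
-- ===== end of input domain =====

-- B restructures A's fused scan (DFS stack + boolean visited matrix, painting each component as it
-- is found) into two phases over a flattened cell list: collect all components first (BFS frontier
-- over a visited coordinate set), then build the 7/8 base image and paint the collected components
-- (objective: alternative, not faster).


-- ===== PORT A =====
-- shared 2D access helpers (indices are produced nonnegative and in range by both programs;
-- getD is only a totality guard there)
def pvGet2 (g : List (List Int)) (x y : Int) : Int := (g.getD x.toNat []).getD y.toNat 0
def pvSet2 (o : List (List Int)) (x y : Int) (v : Int) : List (List Int) :=
  o.set x.toNat ((o.getD x.toNat []).set y.toNat v)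
def pvGetV (vis : List (List Bool)) (x y : Int) : Bool := (vis.getD x.toNat []).getD y.toNat false
def pvSetV (vis : List (List Bool)) (x y : Int) : List (List Bool) :=
  vis.set x.toNat ((vis.getD x.toNat []).set y.toNat true)

def pvDirs : List (Int × Int) := [(-1, 0), (1, 0), (0, -1), (0, 1)]

-- A's `while stack:` loop; head of the list is the top of Python's stack (append/pop at the end).
-- fuel is a totality guard only: each pushed cell flips a visited entry, so h*w+1 never runs out.
def pvLoopA (g : List (List Int)) (h w v : Int) :
    Nat → List (Int × Int) → List (Int × Int) → List (List Bool) →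
    List (Int × Int) × List (List Bool)
  | 0, _, comp, vis => (comp, vis)
  | _ + 1, [], comp, vis => (comp, vis)
  | fuel + 1, (x, y) :: rest, comp, vis =>
    let st := pvDirs.foldl (fun (st : List (Int × Int) × List (List Bool)) d =>
        let nx := x + d.1
        let ny := y + d.2
        if 0 ≤ nx ∧ nx < h ∧ 0 ≤ ny ∧ ny < w ∧ pvGetV st.2 nx ny = false ∧ pvGet2 g nx ny = v
        then ((nx, ny) :: st.1, pvSetV st.2 nx ny) else st) (rest, vis)
    pvLoopA g h w v fuel st.1 (comp ++ [(x, y)]) st.2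

def transform (grid : List (List Int)) : List (List Int) :=
  let h := grid.length
  if h = 0 then grid else
  let w := (grid.headD []).length
  let out0 : List (List Int) := List.replicate h (List.replicate w 7)
  let out1 := (PySem.List.pyRange 0 (h : Int) 1).foldl (fun o r =>
      (PySem.List.pyRange 0 (w : Int) 1).foldl (fun o c =>
        if pvGet2 grid r c = 8 then pvSet2 o r c 8 else o) o) out0
  let vis0 : List (List Bool) := List.replicate h (List.replicate w false)
  let res := (PySem.List.pyRange 0 (h : Int) 1).foldl
      (fun (st : List (List Int) × List (List Bool)) r =>
      (PySem.List.pyRange 0 (w : Int) 1).foldl (fun st c =>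
        let v := pvGet2 grid r c
        if v ≠ 7 ∧ v ≠ 8 ∧ pvGetV st.2 r c = false then
          let p := pvLoopA grid (h : Int) (w : Int) v (h * w + 1) [(r, c)] [] (pvSetV st.2 r c)
          let s : Int := p.1.length
          let o' := p.1.foldl (fun o q =>
              if 0 ≤ q.1 - s ∧ q.1 - s < (h : Int) then pvSet2 o (q.1 - s) q.2 v else o) st.1
          (o', p.2)
        else st) st) (out1, vis0)
  res.1

-- ===== PORT B =====
def pvNbrs (x y : Int) : List (Int × Int) := [(x - 1, y), (x + 1, y), (x, y - 1), (x, y + 1)]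

-- B's `while frontier:` loop: absorb the frontier into comp, expand it one level.
-- fuel is a totality guard only: every level adds unvisited cells to done, so h*w+1 never runs out.
def pvLoopB (g : List (List Int)) (h w v : Int) :
    Nat → List (Int × Int) → List (Int × Int) → PySem.Set (Int × Int) →
    List (Int × Int) × PySem.Set (Int × Int)
  | 0, _, comp, done => (comp, done)
  | _ + 1, [], comp, done => (comp, done)
  | fuel + 1, f :: fr, comp, done =>
    let st := (f :: fr).foldl (fun (st : List (Int × Int) × PySem.Set (Int × Int)) p =>
        (pvNbrs p.1 p.2).foldl (fun st q =>
          if 0 ≤ q.1 ∧ q.1 < h ∧ 0 ≤ q.2 ∧ q.2 < w ∧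
              PySem.Set.contains st.2 q = false ∧ pvGet2 g q.1 q.2 = v
          then (st.1 ++ [q], PySem.Set.add st.2 q) else st) st) ([], done)
    pvLoopB g h w v fuel st.1 (comp ++ f :: fr) st.2

-- Source B's `_paint` helper: write a component's value s rows up from each of its cells
def pvPaintB (out : List (List Int)) (vc : Int × List (Int × Int)) : List (List Int) :=
  vc.2.foldl (fun o q =>
    if (vc.2.length : Int) ≤ q.1 then pvSet2 o (q.1 - (vc.2.length : Int)) q.2 vc.1 else o) out

def transform_alt (grid : List (List Int)) : List (List Int) :=
  let h := grid.length
  if h = 0 then grid else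
  let w := (grid.headD []).length
  let cells := (PySem.List.pyRange 0 (h : Int) 1).flatMap (fun r =>
      (PySem.List.pyRange 0 (w : Int) 1).map (fun c => (r, c)))
  let scan := cells.foldl
      (fun (st : List (Int × List (Int × Int)) × PySem.Set (Int × Int)) p =>
        let v := pvGet2 grid p.1 p.2
        if v ≠ 7 ∧ v ≠ 8 ∧ PySem.Set.contains st.2 p = false then
          let q := pvLoopB grid (h : Int) (w : Int) v (h * w + 1) [p] [] (PySem.Set.add st.2 p)
          (st.1 ++ [(v, q.1)], q.2)
        else st) ([], PySem.Set.empty)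
  let out0 := (PySem.List.pyRange 0 (h : Int) 1).map (fun r =>
      (PySem.List.pyRange 0 (w : Int) 1).map (fun c =>
        if pvGet2 grid r c = 8 then (8 : Int) else 7))
  scan.1.foldl pvPaintB out0

-- ===== PRECONDITION & SPEC =====
-- Pre_ excludes exactly the ragged grids (a row shorter than row 0) on which the Python A
-- raises IndexError (B raises there too); nothing on which A returns is excluded.
def Pre_transform (grid : List (List Int)) : Prop :=
  ∀ row ∈ grid, (grid.headD []).length ≤ row.length
instance (grid : List (List Int)) : Decidable (Pre_transform grid) := by
  unfold Pre_transform; infer_instance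

def pvWitness_transform : List (List Int) := [[1, 7], [8, 1], [2, 7]]

def Spec_transform (grid : List (List Int)) (out : List (List Int)) : Prop := out = transform_alt grid
instance (grid : List (List Int)) (out : List (List Int)) : Decidable (Spec_transform grid out) := by unfold Spec_transform; infer_instance

-- ===== CLAIM (what is proved, stated in full; the proofs are below) =====
def Claim_equal_transform : Prop := ∀ (grid : List (List Int)), Dom_transform grid → Pre_transform grid → Spec_transform grid (transform grid)

-- ===== LEMMAS AND PROOFS =====

-- generic: two folds over the same list preserve a relation
lemma pvFoldlRel {a s t : Type} (R : s → t → Prop) (f : s → a → s) (g : t → a → t)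
    (l : List a) (s0 : s) (t0 : t) (h : R s0 t0)
    (hstep : ∀ x ∈ l, ∀ s1 t1, R s1 t1 → R (f s1 x) (g t1 x)) :
    R (l.foldl f s0) (l.foldl g t0) := by
  induction l generalizing s0 t0 with
  | nil => exact h
  | cons x l ih =>
      exact ih (f s0 x) (g t0 x) (hstep x (by simp) s0 t0 h)
        (fun y hy => hstep y (by simp [hy]))

-- generic: a fold over a flatMap is the nested fold
lemma pvFoldl_flatMap {a b c : Type} (l : List a) (f : a → List b) (g : c → b → c) (init : c) :
    (l.flatMap f).foldl g init = l.foldl (fun acc x => (f x).foldl g acc) init := by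
  induction l generalizing init with
  | nil => rfl
  | cons x l ih => simp [List.flatMap_cons, List.foldl_append, ih]

def pvInR (hn wn : Nat) (p : Int × Int) : Prop :=
  0 ≤ p.1 ∧ p.1 < (hn : Int) ∧ 0 ≤ p.2 ∧ p.2 < (wn : Int)

def pvOk (g : List (List Int)) (hn wn : Nat) (v : Int) (p : Int × Int) : Prop :=
  pvInR hn wn p ∧ pvGet2 g p.1 p.2 = v

-- cells reachable from s0 through ok, not-previously-visited cells
inductive pvRch (g : List (List Int)) (hn wn : Nat) (v : Int) (V : Int × Int → Prop)
    (s0 : Int × Int) : Int × Int → Prop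
  | base : pvRch g hn wn v V s0 s0
  | step {p q : Int × Int} : pvRch g hn wn v V s0 p → q ∈ pvNbrs p.1 p.2 →
      pvOk g hn wn v q → ¬ V q → pvRch g hn wn v V s0 q

def pvShape (hn wn : Nat) (vis : List (List Bool)) : Prop :=
  vis.length = hn ∧ ∀ row ∈ vis, row.length = wn

lemma pvDisjOf {A : Type} {l1 l2 : List A} (h : ∀ a ∈ l1, a ∉ l2) :
    ∀ a ∈ l1, ∀ b ∈ l2, a ≠ b :=
  fun a ha b hb heq => h a ha (heq ▸ hb)

lemma pvGetD_set {a : Type} (l : List a) (i j : Nat) (x d : a) :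
    (l.set i x).getD j d = if i = j ∧ j < l.length then x else l.getD j d := by
  simp only [List.getD_eq_getElem?_getD, List.getElem?_set]
  by_cases hij : i = j
  · subst hij
    by_cases hl : i < l.length <;> simp [hl]
  · simp [hij]

lemma pvSetV_oob (vis : List (List Bool)) (x y : Int) (h : vis.length ≤ x.toNat) :
    pvSetV vis x y = vis := by
  simp [pvSetV, List.set_eq_of_length_le h]

lemma pvShape_setV (hn wn : Nat) (vis : List (List Bool)) (hsh : pvShape hn wn vis)
    (x y : Int) : pvShape hn wn (pvSetV vis x y) := by
  by_cases hx : x.toNat < vis.length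
  · refine ⟨by simpa [pvSetV] using hsh.1, ?_⟩
    intro row hrow
    rcases List.mem_or_eq_of_mem_set hrow with h | h
    · exact hsh.2 row h
    · subst h
      rw [List.getD_eq_getElem _ _ hx, List.length_set]
      exact hsh.2 _ (List.getElem_mem hx)
  · rw [pvSetV_oob vis x y (by omega)]
    exact hsh

lemma pvGetV_setV_iff (hn wn : Nat) (vis : List (List Bool)) (hsh : pvShape hn wn vis)
    (q p : Int × Int) (hq : pvInR hn wn q) (hp : pvInR hn wn p) :
    (pvGetV (pvSetV vis q.1 q.2) p.1 p.2 = true ↔ pvGetV vis p.1 p.2 = true ∨ p = q) := by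
  obtain ⟨hq1, hq2, hq3, hq4⟩ := hq
  obtain ⟨hp1, hp2, hp3, hp4⟩ := hp
  have hlen := hsh.1
  have hqx : q.1.toNat < vis.length := by omega
  have hrowlen : (vis.getD q.1.toNat []).length = wn := by
    rw [List.getD_eq_getElem _ _ hqx]; exact hsh.2 _ (List.getElem_mem hqx)
  unfold pvGetV pvSetV
  rw [pvGetD_set]
  by_cases hx : q.1.toNat = p.1.toNat ∧ p.1.toNat < vis.length
  · rw [if_pos hx]
    rw [pvGetD_set]
    by_cases hy : q.2.toNat = p.2.toNat ∧ p.2.toNat < (vis.getD q.1.toNat []).length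
    · rw [if_pos hy]
      have heq : p = q := by
        obtain ⟨a, b⟩ := p; obtain ⟨a', b'⟩ := q
        simp only [Prod.mk.injEq]
        simp only at hx hy hq1 hq3 hp1 hp3
        constructor <;> omega
      simp [heq]
    · rw [if_neg hy]
      have hne : p ≠ q := by
        intro h; subst h
        exact hy ⟨rfl, by omega⟩
      rw [← hx.1]
      simp [hne]
  · rw [if_neg hx]
    have hne : p ≠ q := by
      intro h; subst h
      exact hx ⟨rfl, by omega⟩
    simp [hne]

def pvCntF (vis : List (List Bool)) : Nat := (vis.map (fun r => r.count false)).sum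

lemma pvSum_set (l : List Nat) (i : Nat) (a : Nat) (h : i < l.length) :
    (l.set i a).sum + l[i] = l.sum + a := by
  induction l generalizing i with
  | nil => simp at h
  | cons b l ih =>
      cases i with
      | zero => simp [List.set]; omega
      | succ i =>
          simp only [List.set, List.sum_cons, List.getElem_cons_succ]
          have := ih i (by simpa using h)
          omega

lemma pvCount_set_true (row : List Bool) (j : Nat) (h : j < row.length)
    (hf : row[j] = false) :
    (row.set j true).count false + 1 = row.count false := by
  induction row generalizing j with
  | nil => simp at h
  | cons b l ih =>
      cases j with
      | zero =>
          simp only [List.getElem_cons_zero] at hf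
          subst hf
          simp [List.set, List.count_cons]
      | succ j =>
          simp only [List.getElem_cons_succ] at hf
          have := ih j (by simpa using h) hf
          simp only [List.set, List.count_cons]
          omega

lemma pvCntF_setV (hn wn : Nat) (vis : List (List Bool)) (hsh : pvShape hn wn vis)
    (q : Int × Int) (hq : pvInR hn wn q) (hfalse : pvGetV vis q.1 q.2 = false) :
    pvCntF (pvSetV vis q.1 q.2) + 1 = pvCntF vis := by
  obtain ⟨h1, h2, h3, h4⟩ := hq
  have hlen := hsh.1
  have hi : q.1.toNat < vis.length := by omega
  have hrow : vis.getD q.1.toNat [] = vis[q.1.toNat] := List.getD_eq_getElem _ _ hi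
  have hrl : vis[q.1.toNat].length = wn := hsh.2 _ (List.getElem_mem hi)
  have hj : q.2.toNat < vis[q.1.toNat].length := by omega
  have hjf : vis[q.1.toNat][q.2.toNat] = false := by
    unfold pvGetV at hfalse
    rw [hrow] at hfalse
    rwa [List.getD_eq_getElem _ _ hj] at hfalse
  unfold pvCntF pvSetV
  rw [hrow, List.map_set]
  have hi' : q.1.toNat < (vis.map (fun r => r.count false)).length := by simpa using hi
  have hs := pvSum_set (vis.map (fun r => r.count false)) q.1.toNat
      ((vis[q.1.toNat].set q.2.toNat true).count false) hi'
  have hmapi : (vis.map (fun r => r.count false))[q.1.toNat]'hi' = vis[q.1.toNat].count false := by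
    simp
  rw [hmapi] at hs
  have hc := pvCount_set_true vis[q.1.toNat] q.2.toNat hj hjf
  omega

lemma pvCntF_le (hn wn : Nat) (vis : List (List Bool)) (hsh : pvShape hn wn vis) :
    pvCntF vis ≤ hn * wn := by
  have haux : ∀ (l : List (List Bool)), (∀ r ∈ l, r.length = wn) →
      (l.map (fun r => r.count false)).sum ≤ l.length * wn := by
    intro l hl
    induction l with
    | nil => simp
    | cons r l ih =>
        simp only [List.map_cons, List.sum_cons, List.length_cons]
        have h1 : r.count false ≤ wn := by
          rw [← hl r (by simp)]; exact List.count_le_length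
        have h2 := ih (fun r' hr' => hl r' (by simp [hr']))
        rw [Nat.succ_mul]
        omega
  have := haux vis hsh.2
  rwa [hsh.1] at this

def pvCells (hn wn : Nat) : List (Int × Int) :=
  (List.range hn).flatMap (fun (i : Nat) => (List.range wn).map (fun (j : Nat) => ((i : Int), (j : Int))))

lemma pvCells_succ (hn wn : Nat) :
    pvCells (hn + 1) wn
      = pvCells hn wn ++ (List.range wn).map (fun (j : Nat) => ((hn : Int), (j : Int))) := by
  simp [pvCells, List.range_succ]

lemma pvCells_mem (hn wn : Nat) (p : Int × Int) : p ∈ pvCells hn wn ↔ pvInR hn wn p := by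
  unfold pvInR
  constructor
  · intro hp
    obtain ⟨i, hi, hpi⟩ := List.mem_flatMap.1 hp
    obtain ⟨j, hj, rfl⟩ := List.mem_map.1 hpi
    have hi' := List.mem_range.1 hi
    have hj' := List.mem_range.1 hj
    refine ⟨?_, ?_, ?_, ?_⟩ <;> dsimp only <;> omega
  · rintro ⟨h1, h2, h3, h4⟩
    refine List.mem_flatMap.2 ⟨p.1.toNat, List.mem_range.2 (by omega), ?_⟩
    refine List.mem_map.2 ⟨p.2.toNat, List.mem_range.2 (by omega), ?_⟩
    obtain ⟨x, y⟩ := p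
    simp only [Prod.mk.injEq]
    dsimp only at h1 h2 h3 h4
    constructor <;> omega

lemma pvCells_nodup (hn wn : Nat) : (pvCells hn wn).Nodup := by
  induction hn with
  | zero => simp [pvCells]
  | succ n ih =>
      rw [pvCells_succ, List.nodup_append]
      refine ⟨ih, ?_, ?_⟩
      · refine List.Nodup.map ?_ List.nodup_range
        intro x y h
        simpa using h
      · refine pvDisjOf ?_
        intro p hp hq
        have h1 := (pvCells_mem n wn p).1 hp
        obtain ⟨j, _, hj⟩ := List.mem_map.1 hq
        obtain ⟨x, y⟩ := p
        simp only [Prod.mk.injEq] at hj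
        unfold pvInR at h1
        dsimp only at h1
        omega

lemma pvCells_length (hn wn : Nat) : (pvCells hn wn).length = hn * wn := by
  induction hn with
  | zero => simp [pvCells]
  | succ n ih =>
      rw [pvCells_succ, List.length_append, ih]
      simp [Nat.succ_mul]

def pvU (hn wn : Nat) (done : List (Int × Int)) : Nat :=
  (pvCells hn wn).countP (fun p => !decide (p ∈ done))

lemma pvU_le (hn wn : Nat) (done : List (Int × Int)) : pvU hn wn done ≤ hn * wn := by
  calc pvU hn wn done ≤ (pvCells hn wn).length := List.countP_le_length
  _ = hn * wn := pvCells_length hn wn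

lemma pvCountP_partition (done done' new : List (Int × Int))
    (hiff : ∀ p, p ∈ done' ↔ p ∈ done ∨ p ∈ new)
    (hfresh : ∀ q ∈ new, q ∉ done) :
    ∀ (l : List (Int × Int)),
      l.countP (fun p => !decide (p ∈ done)) =
        l.countP (fun p => !decide (p ∈ done')) + l.countP (fun p => decide (p ∈ new)) := by
  intro l
  induction l with
  | nil => simp
  | cons x l ih =>
      rw [List.countP_cons, List.countP_cons, List.countP_cons, ih]
      by_cases ha : x ∈ new
      · have h1 : x ∉ done := hfresh x ha
        have h2 : x ∈ done' := (hiff x).2 (Or.inr ha)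
        simp [ha, h1, h2]
        omega
      · by_cases hd : x ∈ done
        · have h2 : x ∈ done' := (hiff x).2 (Or.inl hd)
          simp [ha, hd, h2]
        · have h2 : x ∉ done' := by
            intro h
            rcases (hiff x).1 h with h | h <;> contradiction
          simp [ha, hd, h2]
          omega

lemma pvCountP_mem_eq_length (hn wn : Nat) (new : List (Int × Int)) (hnd : new.Nodup)
    (hin : ∀ q ∈ new, pvInR hn wn q) :
    (pvCells hn wn).countP (fun p => decide (p ∈ new)) = new.length := by
  rw [List.countP_eq_length_filter]
  have hperm : ((pvCells hn wn).filter (fun p => decide (p ∈ new))).Perm new := by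
    rw [List.perm_ext_iff_of_nodup (List.Nodup.filter _ (pvCells_nodup hn wn)) hnd]
    intro x
    simp only [List.mem_filter, decide_eq_true_eq]
    constructor
    · exact fun h => h.2
    · intro h
      exact ⟨(pvCells_mem hn wn x).2 (hin x h), h⟩
  exact hperm.length_eq

lemma pvU_drop (hn wn : Nat) (done done' new : List (Int × Int))
    (hiff : ∀ p, p ∈ done' ↔ p ∈ done ∨ p ∈ new) (hnd : new.Nodup)
    (hin : ∀ q ∈ new, pvInR hn wn q) (hfresh : ∀ q ∈ new, q ∉ done) :
    pvU hn wn done' + new.length = pvU hn wn done := by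
  have h := pvCountP_partition done done' new hiff hfresh (pvCells hn wn)
  rw [pvCountP_mem_eq_length hn wn new hnd hin] at h
  unfold pvU
  omega

lemma pvNbrs_nodup (x y : Int) : (pvNbrs x y).Nodup := by
  simp [pvNbrs, Prod.mk.injEq]
  omega

lemma pvDirs_map_eq (x y : Int) :
    pvDirs.map (fun d => (x + d.1, y + d.2)) = pvNbrs x y := by
  simp [pvDirs, pvNbrs, Prod.mk.injEq]
  omega

lemma pvContains_false {s : PySem.Set (Int × Int)} {x : Int × Int} :
    PySem.Set.contains s x = false ↔ x ∉ s := by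
  constructor
  · intro h hmem
    rw [(PySem.Set.contains_iff s x).2 hmem] at h
    cases h
  · intro h
    cases hc : PySem.Set.contains s x
    · rfl
    · exact absurd ((PySem.Set.contains_iff s x).1 hc) h

lemma pvGuardIff (g : List (List Int)) (hn wn : Nat) (v : Int) (q : Int × Int) (X : Prop) :
    (0 ≤ q.1 ∧ q.1 < (hn : Int) ∧ 0 ≤ q.2 ∧ q.2 < (wn : Int) ∧ X ∧ pvGet2 g q.1 q.2 = v)
      ↔ (pvOk g hn wn v q ∧ X) := by
  unfold pvOk pvInR
  tauto

-- A-side: one pass over candidate cells, marking and pushing the fresh ones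
lemma pvPushCellsA (g : List (List Int)) (hn wn : Nat) (v : Int) :
    ∀ (cs : List (Int × Int)), cs.Nodup →
    ∀ (acc : List (Int × Int)) (vis : List (List Bool)), pvShape hn wn vis →
    ∃ new vis',
      cs.foldl (fun (st : List (Int × Int) × List (List Bool)) q =>
          if 0 ≤ q.1 ∧ q.1 < (hn : Int) ∧ 0 ≤ q.2 ∧ q.2 < (wn : Int) ∧
              pvGetV st.2 q.1 q.2 = false ∧ pvGet2 g q.1 q.2 = v
          then (q :: st.1, pvSetV st.2 q.1 q.2) else st) (acc, vis) = (new ++ acc, vis') ∧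
      new.Nodup ∧
      (∀ q, q ∈ new ↔ (q ∈ cs ∧ pvOk g hn wn v q ∧ pvGetV vis q.1 q.2 = false)) ∧
      pvShape hn wn vis' ∧
      (∀ p, pvInR hn wn p → (pvGetV vis' p.1 p.2 = true ↔ pvGetV vis p.1 p.2 = true ∨ p ∈ new)) ∧
      pvCntF vis' + new.length = pvCntF vis := by
  intro cs
  induction cs with
  | nil =>
      intro _ acc vis hsh
      exact ⟨[], vis, by simp, by simp, by simp, hsh, by simp, by simp⟩
  | cons q cs ih =>
      intro hnd acc vis hsh
      have hq_not : q ∉ cs := (List.nodup_cons.1 hnd).1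
      have hnd' : cs.Nodup := (List.nodup_cons.1 hnd).2
      simp only [List.foldl_cons]
      by_cases hg : 0 ≤ q.1 ∧ q.1 < (hn : Int) ∧ 0 ≤ q.2 ∧ q.2 < (wn : Int) ∧
          pvGetV vis q.1 q.2 = false ∧ pvGet2 g q.1 q.2 = v
      · rw [if_pos hg]
        have hgok := (pvGuardIff g hn wn v q _).1 hg
        have hqok : pvOk g hn wn v q := hgok.1
        have hqf : pvGetV vis q.1 q.2 = false := hgok.2
        have hqin : pvInR hn wn q := hqok.1
        have hsh1 := pvShape_setV hn wn vis hsh q.1 q.2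
        obtain ⟨new', vis', heq, hnd2, hmem, hsh', hvis', hcnt⟩ :=
          ih hnd' (q :: acc) (pvSetV vis q.1 q.2) hsh1
        refine ⟨new' ++ [q], vis', ?_, ?_, ?_, hsh', ?_, ?_⟩
        · rw [heq]; simp
        · rw [List.nodup_append]
          refine ⟨hnd2, by simp, pvDisjOf ?_⟩
          intro a ha hb
          simp only [List.mem_singleton] at hb
          subst hb
          exact hq_not ((hmem a).1 ha).1
        · intro q'
          simp only [List.mem_append, List.mem_cons, List.not_mem_nil, or_false]
          constructor
          · rintro (h | rfl)
            · obtain ⟨hcs, hok', hvv⟩ := (hmem q').1 h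
              have hne : q' ≠ q := fun he => hq_not (he ▸ hcs)
              refine ⟨Or.inr hcs, hok', ?_⟩
              cases hbv : pvGetV vis q'.1 q'.2
              · rfl
              · have := (pvGetV_setV_iff hn wn vis hsh q q' hqin hok'.1).2 (Or.inl hbv)
                rw [this] at hvv
                cases hvv
            · exact ⟨Or.inl rfl, hqok, hqf⟩
          · rintro ⟨h1, h2, h3⟩
            rcases h1 with rfl | hcs
            · exact Or.inr rfl
            · refine Or.inl ((hmem q').2 ⟨hcs, h2, ?_⟩)
              have hne : q' ≠ q := fun he => hq_not (he ▸ hcs)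
              cases hbv : pvGetV (pvSetV vis q.1 q.2) q'.1 q'.2
              · rfl
              · rcases (pvGetV_setV_iff hn wn vis hsh q q' hqin h2.1).1 hbv with h | h
                · rw [h3] at h; cases h
                · exact absurd h hne
        · intro p hp
          have h1 := hvis' p hp
          have h2 := pvGetV_setV_iff hn wn vis hsh q p hqin hp
          rw [h1, h2]
          simp only [List.mem_append, List.mem_singleton]
          tauto
        · have hc := pvCntF_setV hn wn vis hsh q hqin hqf
          rw [List.length_append]
          simp only [List.length_singleton]
          omega
      · rw [if_neg hg]
        obtain ⟨new', vis', heq, hnd2, hmem, hsh', hvis', hcnt⟩ := ih hnd' acc vis hsh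
        refine ⟨new', vis', heq, hnd2, ?_, hsh', hvis', hcnt⟩
        intro q'
        rw [hmem q']
        constructor
        · rintro ⟨h1, h2, h3⟩
          exact ⟨List.mem_cons_of_mem _ h1, h2, h3⟩
        · rintro ⟨h1, h2, h3⟩
          rcases List.mem_cons.1 h1 with rfl | h1
          · exact absurd ((pvGuardIff g hn wn v q' _).2 ⟨h2, h3⟩) hg
          · exact ⟨h1, h2, h3⟩

-- B-side: one pass over candidate cells, adding the fresh ones to the set
lemma pvPushCellsB (g : List (List Int)) (hn wn : Nat) (v : Int) :
    ∀ (cs : List (Int × Int)), cs.Nodup →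
    ∀ (acc : List (Int × Int)) (done : PySem.Set (Int × Int)),
    ∃ new done',
      cs.foldl (fun (st : List (Int × Int) × PySem.Set (Int × Int)) q =>
          if 0 ≤ q.1 ∧ q.1 < (hn : Int) ∧ 0 ≤ q.2 ∧ q.2 < (wn : Int) ∧
              PySem.Set.contains st.2 q = false ∧ pvGet2 g q.1 q.2 = v
          then (st.1 ++ [q], PySem.Set.add st.2 q) else st) (acc, done) = (acc ++ new, done') ∧
      new.Nodup ∧
      (∀ q, q ∈ new ↔ (q ∈ cs ∧ pvOk g hn wn v q ∧ q ∉ done)) ∧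
      (∀ p, p ∈ done' ↔ p ∈ done ∨ p ∈ new) := by
  intro cs
  induction cs with
  | nil =>
      intro _ acc done
      exact ⟨[], done, by simp, by simp, by simp, by simp⟩
  | cons q cs ih =>
      intro hnd acc done
      have hq_not : q ∉ cs := (List.nodup_cons.1 hnd).1
      have hnd' : cs.Nodup := (List.nodup_cons.1 hnd).2
      simp only [List.foldl_cons]
      by_cases hg : 0 ≤ q.1 ∧ q.1 < (hn : Int) ∧ 0 ≤ q.2 ∧ q.2 < (wn : Int) ∧
          PySem.Set.contains done q = false ∧ pvGet2 g q.1 q.2 = v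
      · rw [if_pos hg]
        have hgok := (pvGuardIff g hn wn v q _).1 hg
        have hqnd : q ∉ done := pvContains_false.1 hgok.2
        obtain ⟨new', done', heq, hnd2, hmem, hdn⟩ := ih hnd' (acc ++ [q]) (PySem.Set.add done q)
        refine ⟨q :: new', done', ?_, ?_, ?_, ?_⟩
        · rw [heq]; simp
        · rw [List.nodup_cons]
          refine ⟨?_, hnd2⟩
          intro hq'
          exact ((hmem q).1 hq').2.2 ((PySem.Set.mem_add done q q).2 (Or.inr rfl))
        · intro q'
          simp only [List.mem_cons]
          constructor
          · rintro (rfl | h)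
            · exact ⟨Or.inl rfl, hgok.1, hqnd⟩
            · obtain ⟨hcs, hok', hnd3⟩ := (hmem q').1 h
              have hq'nd : q' ∉ done := fun hd => hnd3 ((PySem.Set.mem_add done q q').2 (Or.inl hd))
              exact ⟨Or.inr hcs, hok', hq'nd⟩
          · rintro ⟨h1, h2, h3⟩
            rcases h1 with rfl | hcs
            · exact Or.inl rfl
            · refine Or.inr ((hmem q').2 ⟨hcs, h2, ?_⟩)
              intro hd
              rcases (PySem.Set.mem_add done q q').1 hd with h | rfl
              · exact h3 h
              · exact hq_not hcs
        · intro p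
          rw [hdn p, PySem.Set.mem_add]
          simp only [List.mem_cons]
          tauto
      · rw [if_neg hg]
        obtain ⟨new', done', heq, hnd2, hmem, hdn⟩ := ih hnd' acc done
        refine ⟨new', done', heq, hnd2, ?_, hdn⟩
        intro q'
        rw [hmem q']
        constructor
        · rintro ⟨h1, h2, h3⟩
          exact ⟨List.mem_cons_of_mem _ h1, h2, h3⟩
        · rintro ⟨h1, h2, h3⟩
          rcases List.mem_cons.1 h1 with rfl | h1
          · exact absurd ((pvGuardIff g hn wn v q' _).2 ⟨h2, pvContains_false.2 h3⟩) hg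
          · exact ⟨h1, h2, h3⟩

-- B-side: expanding a whole frontier level
lemma pvExpandB (g : List (List Int)) (hn wn : Nat) (v : Int) :
    ∀ (fr : List (Int × Int)) (acc : List (Int × Int)) (done : PySem.Set (Int × Int)),
    ∃ new done',
      fr.foldl (fun (st : List (Int × Int) × PySem.Set (Int × Int)) p =>
          (pvNbrs p.1 p.2).foldl (fun st q =>
            if 0 ≤ q.1 ∧ q.1 < (hn : Int) ∧ 0 ≤ q.2 ∧ q.2 < (wn : Int) ∧
                PySem.Set.contains st.2 q = false ∧ pvGet2 g q.1 q.2 = v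
            then (st.1 ++ [q], PySem.Set.add st.2 q) else st) st) (acc, done)
        = (acc ++ new, done') ∧
      new.Nodup ∧
      (∀ q, q ∈ new ↔ (pvOk g hn wn v q ∧ q ∉ done ∧ ∃ p ∈ fr, q ∈ pvNbrs p.1 p.2)) ∧
      (∀ p, p ∈ done' ↔ p ∈ done ∨ p ∈ new) := by
  intro fr
  induction fr with
  | nil =>
      intro acc done
      exact ⟨[], done, by simp, by simp, by simp, by simp⟩
  | cons p0 fr ih =>
      intro acc done
      simp only [List.foldl_cons]
      obtain ⟨n1, d1, he1, hnd1, hm1, hd1⟩ :=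
        pvPushCellsB g hn wn v (pvNbrs p0.1 p0.2) (pvNbrs_nodup p0.1 p0.2) acc done
      rw [he1]
      obtain ⟨n2, d2, he2, hnd2, hm2, hd2⟩ := ih (acc ++ n1) d1
      refine ⟨n1 ++ n2, d2, ?_, ?_, ?_, ?_⟩
      · rw [he2, List.append_assoc]
      · rw [List.nodup_append]
        refine ⟨hnd1, hnd2, pvDisjOf ?_⟩
        intro a ha hb
        exact ((hm2 a).1 hb).2.1 ((hd1 a).2 (Or.inr ha))
      · intro q
        simp only [List.mem_append]
        constructor
        · rintro (h | h)
          · obtain ⟨hnb, hok, hnd3⟩ := (hm1 q).1 h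
            exact ⟨hok, hnd3, p0, by simp, hnb⟩
          · obtain ⟨hok, hnd3, p', hp', hnb⟩ := (hm2 q).1 h
            have hq : q ∉ done := fun hq => hnd3 ((hd1 q).2 (Or.inl hq))
            exact ⟨hok, hq, p', List.mem_cons_of_mem _ hp', hnb⟩
        · rintro ⟨hok, hnd3, p', hp', hnb⟩
          rcases List.mem_cons.1 hp' with rfl | hp'
          · exact Or.inl ((hm1 q).2 ⟨hnb, hok, hnd3⟩)
          · by_cases hqd : q ∈ d1
            · rcases (hd1 q).1 hqd with h | h
              · exact absurd h hnd3
              · exact Or.inl h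
            · exact Or.inr ((hm2 q).2 ⟨hok, hqd, p', hp', hnb⟩)
      · intro p
        rw [hd2 p, hd1 p]
        simp only [List.mem_append]
        tauto

lemma pvLoopB_nil (g : List (List Int)) (h w v : Int) (fuel : Nat)
    (comp : List (Int × Int)) (done : PySem.Set (Int × Int)) :
    pvLoopB g h w v fuel [] comp done = (comp, done) := by
  cases fuel <;> rfl

lemma pvLoopA_nil (g : List (List Int)) (h w v : Int) (fuel : Nat)
    (comp : List (Int × Int)) (vis : List (List Bool)) :
    pvLoopA g h w v fuel [] comp vis = (comp, vis) := by
  cases fuel <;> rfl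

lemma pvLoopA_spec (g : List (List Int)) (hn wn : Nat) (v : Int) (V : Int × Int → Prop)
    (s0 : Int × Int) :
    ∀ (fuel : Nat) (stack comp : List (Int × Int)) (vis : List (List Bool)),
    stack.length + pvCntF vis ≤ fuel →
    pvShape hn wn vis →
    (∀ p, pvInR hn wn p → (pvGetV vis p.1 p.2 = true ↔ V p ∨ p ∈ comp ∨ p ∈ stack)) →
    (comp ++ stack).Nodup →
    (∀ p ∈ comp ++ stack, pvOk g hn wn v p ∧ ¬ V p ∧ pvRch g hn wn v V s0 p) →
    (∀ p ∈ comp, ∀ q ∈ pvNbrs p.1 p.2, pvOk g hn wn v q → ¬ V q → (q ∈ comp ∨ q ∈ stack)) →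
    pvShape hn wn (pvLoopA g (hn : Int) (wn : Int) v fuel stack comp vis).2 ∧
    (pvLoopA g (hn : Int) (wn : Int) v fuel stack comp vis).1.Nodup ∧
    (∀ p, p ∈ comp ∨ p ∈ stack → p ∈ (pvLoopA g (hn : Int) (wn : Int) v fuel stack comp vis).1) ∧
    (∀ p ∈ (pvLoopA g (hn : Int) (wn : Int) v fuel stack comp vis).1,
      pvOk g hn wn v p ∧ ¬ V p ∧ pvRch g hn wn v V s0 p) ∧
    (∀ p ∈ (pvLoopA g (hn : Int) (wn : Int) v fuel stack comp vis).1,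
      ∀ q ∈ pvNbrs p.1 p.2, pvOk g hn wn v q → ¬ V q →
        q ∈ (pvLoopA g (hn : Int) (wn : Int) v fuel stack comp vis).1) ∧
    (∀ p, pvInR hn wn p →
      (pvGetV (pvLoopA g (hn : Int) (wn : Int) v fuel stack comp vis).2 p.1 p.2 = true
        ↔ V p ∨ p ∈ (pvLoopA g (hn : Int) (wn : Int) v fuel stack comp vis).1)) := by
  intro fuel
  induction fuel with
  | zero =>
      intro stack comp vis hfuel hsh hvis hnd hcs hcl
      have hstack : stack = [] := by
        cases stack with
        | nil => rfl
        | cons a l => simp at hfuel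
      subst hstack
      rw [pvLoopA_nil]
      refine ⟨hsh, by simpa using hnd, ?_, ?_, ?_, ?_⟩
      · intro p hp
        rcases hp with h | h
        · exact h
        · simp at h
      · intro p hp
        exact hcs p (by simp [hp])
      · intro p hp q hq hok hV
        rcases hcl p hp q hq hok hV with h | h
        · exact h
        · simp at h
      · intro p hp
        rw [hvis p hp]
        simp
  | succ fuel ih =>
      intro stack comp vis hfuel hsh hvis hnd hcs hcl
      cases stack with
      | nil =>
          rw [pvLoopA_nil]
          refine ⟨hsh, by simpa using hnd, ?_, ?_, ?_, ?_⟩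
          · intro p hp
            rcases hp with h | h
            · exact h
            · simp at h
          · intro p hp
            exact hcs p (by simp [hp])
          · intro p hp q hq hok hV
            rcases hcl p hp q hq hok hV with h | h
            · exact h
            · simp at h
          · intro p hp
            rw [hvis p hp]
            simp
      | cons xy rest =>
          obtain ⟨x, y⟩ := xy
          simp only [pvLoopA]
          have hfold : pvDirs.foldl (fun (st : List (Int × Int) × List (List Bool)) d =>
              let nx := x + d.1
              let ny := y + d.2
              if 0 ≤ nx ∧ nx < (hn : Int) ∧ 0 ≤ ny ∧ ny < (wn : Int) ∧
                  pvGetV st.2 nx ny = false ∧ pvGet2 g nx ny = v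
              then ((nx, ny) :: st.1, pvSetV st.2 nx ny) else st) (rest, vis)
            = (pvNbrs x y).foldl (fun (st : List (Int × Int) × List (List Bool)) q =>
              if 0 ≤ q.1 ∧ q.1 < (hn : Int) ∧ 0 ≤ q.2 ∧ q.2 < (wn : Int) ∧
                  pvGetV st.2 q.1 q.2 = false ∧ pvGet2 g q.1 q.2 = v
              then (q :: st.1, pvSetV st.2 q.1 q.2) else st) (rest, vis) := by
            rw [← pvDirs_map_eq x y, List.foldl_map]
          rw [hfold]
          obtain ⟨new, vis', heq, hndn, hmem, hsh', hvis', hcnt⟩ :=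
            pvPushCellsA g hn wn v (pvNbrs x y) (pvNbrs_nodup x y) rest vis hsh
          rw [heq]
          dsimp only
          -- facts about the old state
          have hxyin : (x, y) ∈ comp ++ (x, y) :: rest := by simp
          have hxy := hcs (x, y) hxyin
          -- new cells are unmarked, hence outside V, comp, (x,y)::rest
          have hnewfacts : ∀ a ∈ new, ¬ V a ∧ a ∉ comp ∧ a ≠ (x, y) ∧ a ∉ rest := by
            intro a ha
            obtain ⟨hanb, haok, haf⟩ := (hmem a).1 ha
            have hiff := hvis a haok.1
            have hnot : ¬ (V a ∨ a ∈ comp ∨ a ∈ (x, y) :: rest) := by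
              intro hcon
              rw [(hiff.2 hcon)] at haf
              cases haf
            refine ⟨fun h => hnot (Or.inl h), fun h => hnot (Or.inr (Or.inl h)), ?_, ?_⟩
            · intro h
              exact hnot (Or.inr (Or.inr (by simp [h])))
            · intro h
              exact hnot (Or.inr (Or.inr (by simp [h])))
          -- decompose the old nodup
          have hnd0 := List.nodup_append.1 hnd
          have hndc := hnd0.2.1
          have hxyrest : (x, y) ∉ rest := (List.nodup_cons.1 hndc).1
          have hndrest : rest.Nodup := (List.nodup_cons.1 hndc).2
          have hdisj0 := hnd0.2.2
          -- IH hypotheses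
          have H := ih (new ++ rest) (comp ++ [(x, y)]) vis'
            (by
              rw [List.length_append]
              simp only [List.length_cons] at hfuel
              omega)
            hsh'
            (by
              intro p hp
              rw [hvis' p hp, hvis p hp]
              simp only [List.mem_append, List.mem_cons, List.mem_singleton]
              tauto)
            (by
              rw [List.nodup_append]
              refine ⟨?_, ?_, pvDisjOf ?_⟩
              · rw [List.nodup_append]
                refine ⟨hnd0.1, by simp, pvDisjOf ?_⟩
                intro a ha hb
                simp only [List.mem_singleton] at hb
                subst hb
                exact hdisj0 (x, y) ha (x, y) (by simp) rfl
              · rw [List.nodup_append]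
                refine ⟨hndn, hndrest, pvDisjOf ?_⟩
                intro a ha hb
                exact ((hnewfacts a ha).2.2.2) hb
              · intro a ha hb
                rcases List.mem_append.1 ha with h | h
                · rcases List.mem_append.1 hb with h' | h'
                  · exact ((hnewfacts a h').2.1) h
                  · exact hdisj0 a h a (by simp [h']) rfl
                · simp only [List.mem_singleton] at h
                  subst h
                  rcases List.mem_append.1 hb with h' | h'
                  · exact ((hnewfacts (x, y) h').2.2.1) rfl
                  · exact hxyrest h')
            (by
              intro p hp
              rcases List.mem_append.1 hp with h | h
              · rcases List.mem_append.1 h with h' | h'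
                · exact hcs p (by simp [h'])
                · simp only [List.mem_singleton] at h'
                  subst h'
                  exact hxy
              · rcases List.mem_append.1 h with h' | h'
                · obtain ⟨hanb, haok, _⟩ := (hmem p).1 h'
                  exact ⟨haok, ((hnewfacts p h').1), .step hxy.2.2 hanb haok ((hnewfacts p h').1)⟩
                · exact hcs p (by simp [h']))
            (by
              intro p hp q hq hok hV
              rcases List.mem_append.1 hp with h | h
              · rcases hcl p h q hq hok hV with h' | h'
                · exact Or.inl (List.mem_append_left _ h')
                · rcases List.mem_cons.1 h' with rfl | h''
                  · exact Or.inl (List.mem_append_right _ (by simp))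
                  · exact Or.inr (List.mem_append_right _ h'')
              · simp only [List.mem_singleton] at h
                subst h
                cases hbq : pvGetV vis q.1 q.2
                · exact Or.inr (List.mem_append_left _ ((hmem q).2 ⟨hq, hok, hbq⟩))
                · rcases (hvis q hok.1).1 hbq with h' | h' | h'
                  · exact absurd h' hV
                  · exact Or.inl (List.mem_append_left _ h')
                  · rcases List.mem_cons.1 h' with rfl | h''
                    · exact Or.inl (List.mem_append_right _ (by simp))
                    · exact Or.inr (List.mem_append_right _ h''))
          refine ⟨H.1, H.2.1, ?_, H.2.2.2.1, H.2.2.2.2.1, H.2.2.2.2.2⟩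
          intro p hp
          rcases hp with h | h
          · exact H.2.2.1 p (Or.inl (List.mem_append_left _ h))
          · rcases List.mem_cons.1 h with h' | h'
            · refine H.2.2.1 p (Or.inl (List.mem_append_right _ ?_))
              simp [h']
            · exact H.2.2.1 p (Or.inr (List.mem_append_right _ h'))

lemma pvLoopB_spec (g : List (List Int)) (hn wn : Nat) (v : Int) (V : Int × Int → Prop)
    (s0 : Int × Int) :
    ∀ (fuel : Nat) (fr comp : List (Int × Int)) (done : PySem.Set (Int × Int)),
    1 + pvU hn wn done ≤ fuel →
    (∀ p, p ∈ done ↔ V p ∨ p ∈ comp ∨ p ∈ fr) →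
    (comp ++ fr).Nodup →
    (∀ p ∈ comp ++ fr, pvOk g hn wn v p ∧ ¬ V p ∧ pvRch g hn wn v V s0 p) →
    (∀ p ∈ comp, ∀ q ∈ pvNbrs p.1 p.2, pvOk g hn wn v q → ¬ V q → (q ∈ comp ∨ q ∈ fr)) →
    (pvLoopB g (hn : Int) (wn : Int) v fuel fr comp done).1.Nodup ∧
    (∀ p, p ∈ comp ∨ p ∈ fr → p ∈ (pvLoopB g (hn : Int) (wn : Int) v fuel fr comp done).1) ∧
    (∀ p ∈ (pvLoopB g (hn : Int) (wn : Int) v fuel fr comp done).1,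
      pvOk g hn wn v p ∧ ¬ V p ∧ pvRch g hn wn v V s0 p) ∧
    (∀ p ∈ (pvLoopB g (hn : Int) (wn : Int) v fuel fr comp done).1,
      ∀ q ∈ pvNbrs p.1 p.2, pvOk g hn wn v q → ¬ V q →
        q ∈ (pvLoopB g (hn : Int) (wn : Int) v fuel fr comp done).1) ∧
    (∀ p, p ∈ (pvLoopB g (hn : Int) (wn : Int) v fuel fr comp done).2
        ↔ V p ∨ p ∈ (pvLoopB g (hn : Int) (wn : Int) v fuel fr comp done).1) := by
  intro fuel
  induction fuel with
  | zero =>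
      intro fr comp done hfuel hdone hnd hcs hcl
      omega
  | succ fuel ih =>
      intro fr comp done hfuel hdone hnd hcs hcl
      cases fr with
      | nil =>
          rw [pvLoopB_nil]
          refine ⟨by simpa using hnd, ?_, ?_, ?_, ?_⟩
          · intro p hp
            rcases hp with h | h
            · exact h
            · simp at h
          · intro p hp
            exact hcs p (by simp [hp])
          · intro p hp q hq hok hV
            rcases hcl p hp q hq hok hV with h | h
            · exact h
            · simp at h
          · intro p
            rw [hdone p]
            simp
      | cons f fr' =>
          simp only [pvLoopB]
          obtain ⟨new, done', he, hndn, hmem, hdn⟩ := pvExpandB g hn wn v (f :: fr') [] done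
          simp only [List.nil_append] at he
          rw [he]
          dsimp only
          by_cases hnewnil : new = []
          · subst hnewnil
            rw [pvLoopB_nil]
            dsimp only
            refine ⟨by simpa using hnd, ?_, ?_, ?_, ?_⟩
            · intro p hp
              rcases hp with h | h
              · exact List.mem_append_left _ h
              · exact List.mem_append_right _ h
            · intro p hp
              exact hcs p hp
            · intro p hp q hq hok hV
              rcases List.mem_append.1 hp with h | h
              · rcases hcl p h q hq hok hV with h' | h'
                · exact List.mem_append_left _ h'
                · exact List.mem_append_right _ h'
              · by_cases hqd : q ∈ done
                · rcases (hdone q).1 hqd with h' | h' | h'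
                  · exact absurd h' hV
                  · exact List.mem_append_left _ h'
                  · exact List.mem_append_right _ h'
                · exact absurd ((hmem q).2 ⟨hok, hqd, p, h, hq⟩) (by simp)
            · intro p
              rw [hdn p, hdone p]
              simp only [List.mem_append, List.not_mem_nil, or_false]
          · have hfreshnew : ∀ q ∈ new, q ∉ done := fun q hq => ((hmem q).1 hq).2.1
            have hoknew : ∀ q ∈ new, pvOk g hn wn v q := fun q hq => ((hmem q).1 hq).1
            have hdrop := pvU_drop hn wn done done' new hdn hndn
              (fun q hq => (hoknew q hq).1) hfreshnew
            have hlen : 0 < new.length := by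
              cases new with
              | nil => exact absurd rfl hnewnil
              | cons a l => simp
            have H := ih new (comp ++ f :: fr') done'
              (by omega)
              (by
                intro p
                rw [hdn p, hdone p]
                simp only [List.mem_append]
                tauto)
              (by
                rw [List.nodup_append]
                refine ⟨hnd, hndn, pvDisjOf ?_⟩
                intro a ha hb
                exact (hfreshnew a hb) ((hdone a).2 (by
                  rcases List.mem_append.1 ha with h | h
                  · exact Or.inr (Or.inl h)
                  · exact Or.inr (Or.inr h))))
              (by
                intro p hp
                rcases List.mem_append.1 hp with h | h
                · exact hcs p h
                · obtain ⟨hok, hnd4, p', hp', hnb⟩ := (hmem p).1 h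
                  have hnV : ¬ V p := fun hV => hnd4 ((hdone p).2 (Or.inl hV))
                  exact ⟨hok, hnV,
                    .step (hcs p' (List.mem_append_right _ hp')).2.2 hnb hok hnV⟩)
              (by
                intro p hp q hq hok hV
                rcases List.mem_append.1 hp with h | h
                · rcases hcl p h q hq hok hV with h' | h'
                  · exact Or.inl (List.mem_append_left _ h')
                  · exact Or.inl (List.mem_append_right _ h')
                · by_cases hqd : q ∈ done
                  · rcases (hdone q).1 hqd with h' | h' | h'
                    · exact absurd h' hV
                    · exact Or.inl (List.mem_append_left _ h')
                    · exact Or.inl (List.mem_append_right _ h')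
                  · exact Or.inr ((hmem q).2 ⟨hok, hqd, p, h, hq⟩))
            refine ⟨H.1, ?_, H.2.2.1, H.2.2.2.1, H.2.2.2.2⟩
            intro p hp
            refine H.2.1 p (Or.inl ?_)
            rcases hp with h | h
            · exact List.mem_append_left _ h
            · exact List.mem_append_right _ h

lemma pvCompChar (g : List (List Int)) (hn wn : Nat) (v : Int) (V : Int × Int → Prop)
    (s0 : Int × Int) (C : List (Int × Int)) (hs : s0 ∈ C)
    (hr : ∀ p ∈ C, pvRch g hn wn v V s0 p)
    (hcl : ∀ p ∈ C, ∀ q ∈ pvNbrs p.1 p.2, pvOk g hn wn v q → ¬ V q → q ∈ C) :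
    ∀ p, p ∈ C ↔ pvRch g hn wn v V s0 p := by
  intro p
  constructor
  · exact hr p
  · intro h
    induction h with
    | base => exact hs
    | step hp hnb hok hv ih => exact hcl _ ih _ hnb hok hv

lemma pvRch_mono (g : List (List Int)) (hn wn : Nat) (v : Int) (V V' : Int × Int → Prop)
    (h : ∀ p, pvOk g hn wn v p → (V p ↔ V' p)) (s0 p : Int × Int) :
    pvRch g hn wn v V s0 p → pvRch g hn wn v V' s0 p := by
  intro hr
  induction hr with
  | base => exact .base
  | step hp hnb hok hv ih => exact .step ih hnb hok (fun hV' => hv ((h _ hok).2 hV'))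

lemma pvSet2_comm (o : List (List Int)) (x y x' y' u u' : Int)
    (hx : 0 ≤ x) (hy : 0 ≤ y) (hx' : 0 ≤ x') (hy' : 0 ≤ y')
    (hne : x ≠ x' ∨ y ≠ y') :
    pvSet2 (pvSet2 o x y u) x' y' u' = pvSet2 (pvSet2 o x' y' u') x y u := by
  unfold pvSet2
  by_cases hxx : x.toNat = x'.toNat
  · have hxeq : x = x' := by omega
    subst hxeq
    have hyy : y.toNat ≠ y'.toNat := by
      rcases hne with h | h
      · exact absurd rfl h
      · omega
    by_cases hlen : x.toNat < o.length
    · have h1 : (o.set x.toNat ((o.getD x.toNat []).set y.toNat u)).getD x.toNat []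
          = (o.getD x.toNat []).set y.toNat u := by
        rw [pvGetD_set]
        simp [hlen]
      have h2 : (o.set x.toNat ((o.getD x.toNat []).set y'.toNat u')).getD x.toNat []
          = (o.getD x.toNat []).set y'.toNat u' := by
        rw [pvGetD_set]
        simp [hlen]
      rw [h1, h2, List.set_set, List.set_set, List.set_comm _ _ hyy]
    · have hno : ∀ (r : List Int), o.set x.toNat r = o :=
        fun r => List.set_eq_of_length_le (by omega)
      simp only [hno]
  · have h1 : (o.set x.toNat ((o.getD x.toNat []).set y.toNat u)).getD x'.toNat []
        = o.getD x'.toNat [] := by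
      rw [pvGetD_set]
      simp [hxx]
    have h2 : (o.set x'.toNat ((o.getD x'.toNat []).set y'.toNat u')).getD x.toNat []
        = o.getD x.toNat [] := by
      rw [pvGetD_set]
      simp [Ne.symm hxx]
    rw [h1, h2, List.set_comm _ _ hxx]

-- A's immediate painting of a component equals Source B's `_paint` of an equal component (as a set)
lemma pvPaint_eq (hn : Nat) (v : Int) (CA CB : List (Int × Int)) (o : List (List Int))
    (hndA : CA.Nodup) (hndB : CB.Nodup) (hmem : ∀ p, p ∈ CA ↔ p ∈ CB)
    (hin : ∀ p ∈ CA, 0 ≤ p.1 ∧ p.1 < (hn : Int) ∧ 0 ≤ p.2) :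
    CA.foldl (fun o q =>
        if 0 ≤ q.1 - (CA.length : Int) ∧ q.1 - (CA.length : Int) < (hn : Int)
        then pvSet2 o (q.1 - (CA.length : Int)) q.2 v else o) o
      = pvPaintB o (v, CB) := by
  have hperm : CA.Perm CB := (List.perm_ext_iff_of_nodup hndA hndB).2 hmem
  have hlen : CA.length = CB.length := hperm.length_eq
  have hstep1 : CA.foldl (fun o q =>
      if 0 ≤ q.1 - (CA.length : Int) ∧ q.1 - (CA.length : Int) < (hn : Int)
      then pvSet2 o (q.1 - (CA.length : Int)) q.2 v else o) o
    = CA.foldl (fun o q =>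
      if (CB.length : Int) ≤ q.1 then pvSet2 o (q.1 - (CB.length : Int)) q.2 v else o) o := by
    refine PySem.List.foldl_congr_mem CA _ _ o ?_
    intro acc q hq
    obtain ⟨hq1, hq2, hq3⟩ := hin q hq
    rw [← hlen]
    by_cases hgd : (CA.length : Int) ≤ q.1
    · rw [if_pos (by omega), if_pos hgd]
    · rw [if_neg (by omega), if_neg hgd]
  rw [hstep1]
  show _ = CB.foldl (fun o q =>
      if (CB.length : Int) ≤ q.1 then pvSet2 o (q.1 - (CB.length : Int)) q.2 v else o) o
  refine hperm.foldl_eq' ?_ o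
  intro p hp q' hq' z
  by_cases hpq : p = q'
  · subst hpq
    rfl
  · by_cases h1 : (CB.length : Int) ≤ p.1 <;> by_cases h2 : (CB.length : Int) ≤ q'.1
    · simp only [if_pos h1, if_pos h2]
      refine pvSet2_comm z (p.1 - CB.length) p.2 (q'.1 - CB.length) q'.2 v v
        (by omega) (hin p hp).2.2 (by omega) (hin q' hq').2.2 ?_
      by_cases hx : p.1 = q'.1
      · refine Or.inr ?_
        intro hy
        exact hpq (Prod.ext_iff.2 ⟨hx, hy⟩)
      · exact Or.inl (by omega)
    · simp only [if_pos h1, if_neg h2]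
    · simp only [if_neg h1, if_pos h2]
    · simp only [if_neg h1, if_neg h2]

-- B's base image (the 7/8 map of transform_alt)
def pvOut0 (g : List (List Int)) (hn wn : Nat) : List (List Int) :=
  (PySem.List.pyRange 0 (hn : Int) 1).map (fun r =>
    (PySem.List.pyRange 0 (wn : Int) 1).map (fun c =>
      if pvGet2 g r c = 8 then (8 : Int) else 7))

-- the scan invariant: A's partial image = B's components-so-far painted over the base image,
-- and A's visited matrix marks exactly B's done set
def pvRel2 (g : List (List Int)) (hn wn : Nat)
    (stA : List (List Int) × List (List Bool))
    (stB : List (Int × List (Int × Int)) × PySem.Set (Int × Int)) : Prop :=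
  stA.1 = stB.1.foldl pvPaintB (pvOut0 g hn wn) ∧ pvShape hn wn stA.2 ∧
    ∀ p : Int × Int, pvInR hn wn p → (pvGetV stA.2 p.1 p.2 = true ↔ p ∈ stB.2)

lemma pvStepAB (g : List (List Int)) (hn wn : Nat) (r c : Int)
    (hr1 : 0 ≤ r) (hr2 : r < (hn : Int)) (hc1 : 0 ≤ c) (hc2 : c < (wn : Int))
    (stA : List (List Int) × List (List Bool))
    (stB : List (Int × List (Int × Int)) × PySem.Set (Int × Int))
    (hrel : pvRel2 g hn wn stA stB) :
    pvRel2 g hn wn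
      ((fun (st : List (List Int) × List (List Bool)) (c : Int) =>
        let v := pvGet2 g r c
        if v ≠ 7 ∧ v ≠ 8 ∧ pvGetV st.2 r c = false then
          let p := pvLoopA g (hn : Int) (wn : Int) v (hn * wn + 1) [(r, c)] [] (pvSetV st.2 r c)
          let s : Int := p.1.length
          let o' := p.1.foldl (fun o q =>
              if 0 ≤ q.1 - s ∧ q.1 - s < (hn : Int) then pvSet2 o (q.1 - s) q.2 v else o) st.1
          (o', p.2)
        else st) stA c)
      ((fun (st : List (Int × List (Int × Int)) × PySem.Set (Int × Int)) (p : Int × Int) =>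
        let v := pvGet2 g p.1 p.2
        if v ≠ 7 ∧ v ≠ 8 ∧ PySem.Set.contains st.2 p = false then
          let q := pvLoopB g (hn : Int) (wn : Int) v (hn * wn + 1) [p] [] (PySem.Set.add st.2 p)
          (st.1 ++ [(v, q.1)], q.2)
        else st) stB (r, c)) := by
  unfold pvRel2 at hrel ⊢
  obtain ⟨hout, hshA, hiv⟩ := hrel
  dsimp only
  have hpin : pvInR hn wn (r, c) := ⟨hr1, hr2, hc1, hc2⟩
  by_cases hv78 : pvGet2 g r c ≠ 7 ∧ pvGet2 g r c ≠ 8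
  · by_cases hvis0 : pvGetV stA.2 r c = false
    · -- both sides start a new component
      have hmemB : (r, c) ∉ stB.2 := by
        intro hm
        have := (hiv (r, c) hpin).2 hm
        rw [hvis0] at this
        cases this
      have hcont : PySem.Set.contains stB.2 (r, c) = false := pvContains_false.2 hmemB
      rw [if_pos ⟨hv78.1, hv78.2, hvis0⟩, if_pos ⟨hv78.1, hv78.2, hcont⟩]
      have hshv := pvShape_setV hn wn stA.2 hshA r c
      have hokrc : pvOk g hn wn (pvGet2 g r c) (r, c) := ⟨hpin, rfl⟩
      have hnVA : ¬ pvGetV stA.2 (r, c).1 (r, c).2 = true := by simp [hvis0]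
      have HA := pvLoopA_spec g hn wn (pvGet2 g r c)
        (fun p => pvGetV stA.2 p.1 p.2 = true) (r, c)
        (hn * wn + 1) [(r, c)] [] (pvSetV stA.2 r c)
        (by
          have hle := pvCntF_le hn wn (pvSetV stA.2 r c) hshv
          simp only [List.length_singleton]
          omega)
        hshv
        (by
          intro p hp
          rw [pvGetV_setV_iff hn wn stA.2 hshA (r, c) p hpin hp]
          simp)
        (by simp)
        (by
          intro p hp
          simp only [List.nil_append, List.mem_singleton] at hp
          subst hp
          exact ⟨hokrc, hnVA, .base⟩)
        (by intro p hp; simp at hp)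
      have HB := pvLoopB_spec g hn wn (pvGet2 g r c)
        (fun p => p ∈ stB.2) (r, c)
        (hn * wn + 1) [(r, c)] [] (PySem.Set.add stB.2 (r, c))
        (by
          have hle := pvU_le hn wn (PySem.Set.add stB.2 (r, c))
          omega)
        (by
          intro p
          rw [PySem.Set.mem_add]
          simp)
        (by simp)
        (by
          intro p hp
          simp only [List.nil_append, List.mem_singleton] at hp
          subst hp
          exact ⟨hokrc, hmemB, .base⟩)
        (by intro p hp; simp at hp)
      obtain ⟨hshA', hndA', hsupA, hmemsA, hclA, hvisA'⟩ := HA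
      obtain ⟨hndB', hsupB, hmemsB, hclB, hdnB'⟩ := HB
      have hcharA := pvCompChar g hn wn (pvGet2 g r c) _ (r, c) _
        (hsupA (r, c) (Or.inr (by simp))) (fun p hp => (hmemsA p hp).2.2) hclA
      have hcharB := pvCompChar g hn wn (pvGet2 g r c) _ (r, c) _
        (hsupB (r, c) (Or.inr (by simp))) (fun p hp => (hmemsB p hp).2.2) hclB
      have hVagree : ∀ p, pvOk g hn wn (pvGet2 g r c) p →
          ((pvGetV stA.2 p.1 p.2 = true) ↔ p ∈ stB.2) := fun p hok => hiv p hok.1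
      have hcompiff : ∀ p,
          p ∈ (pvLoopA g (hn : Int) (wn : Int) (pvGet2 g r c) (hn * wn + 1) [(r, c)] []
              (pvSetV stA.2 r c)).1
            ↔ p ∈ (pvLoopB g (hn : Int) (wn : Int) (pvGet2 g r c) (hn * wn + 1) [(r, c)] []
              (PySem.Set.add stB.2 (r, c))).1 := by
        intro p
        rw [hcharA p, hcharB p]
        constructor
        · exact pvRch_mono g hn wn (pvGet2 g r c) _ _ hVagree (r, c) p
        · exact pvRch_mono g hn wn (pvGet2 g r c) _ _
            (fun p h => (hVagree p h).symm) (r, c) p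
      refine ⟨?_, hshA', ?_⟩
      · rw [List.foldl_append]
        simp only [List.foldl_cons, List.foldl_nil]
        rw [← hout]
        exact pvPaint_eq hn (pvGet2 g r c) _ _ stA.1 hndA' hndB' hcompiff
          (fun p hp => ⟨(hmemsA p hp).1.1.1, (hmemsA p hp).1.1.2.1, (hmemsA p hp).1.1.2.2.1⟩)
      · intro p hp
        rw [hvisA' p hp, hdnB' p]
        dsimp only
        rw [hiv p hp, hcompiff p]
    · -- already visited on both sides: no-op
      have hvt : pvGetV stA.2 r c = true := by
        cases h : pvGetV stA.2 r c
        · exact absurd h hvis0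
        · rfl
      have hmemB : (r, c) ∈ stB.2 := (hiv (r, c) hpin).1 hvt
      have hcont : ¬ PySem.Set.contains stB.2 (r, c) = false := by
        intro h
        exact absurd hmemB (pvContains_false.1 h)
      rw [if_neg (by tauto), if_neg (by tauto)]
      exact ⟨hout, hshA, hiv⟩
  · rw [if_neg (by tauto), if_neg (by tauto)]
    exact ⟨hout, hshA, hiv⟩

def pvTab (hn wn : Nat) (f : Int → Int → Int) : List (List Int) :=
  (PySem.List.pyRange 0 (hn : Int) 1).map (fun r =>
    (PySem.List.pyRange 0 (wn : Int) 1).map (fun c => f r c))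

lemma pvTab_congr (hn wn : Nat) (f f' : Int → Int → Int)
    (h : ∀ r c, 0 ≤ r → r < (hn : Int) → 0 ≤ c → c < (wn : Int) → f r c = f' r c) :
    pvTab hn wn f = pvTab hn wn f' := by
  unfold pvTab
  refine List.map_congr_left ?_
  intro r hrm
  have hr := PySem.List.mem_pyRange_one.1 hrm
  refine List.map_congr_left ?_
  intro c hcm
  have hc := PySem.List.mem_pyRange_one.1 hcm
  exact h r c (by omega) (by omega) (by omega) (by omega)

lemma pvTab_const (hn wn : Nat) (x : Int) :
    List.replicate hn (List.replicate wn x) = pvTab hn wn (fun _ _ => x) := by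
  unfold pvTab
  rw [List.map_const', List.map_const']
  simp [PySem.List.length_pyRange_one]

lemma pvMap_pyRange_set {a : Type} (m : Nat) (h : Int → a) (k : Int)
    (hk1 : 0 ≤ k) (hk2 : k < (m : Int)) (x : a) :
    ((PySem.List.pyRange 0 (m : Int) 1).map h).set k.toNat x
      = (PySem.List.pyRange 0 (m : Int) 1).map (fun i => if i = k then x else h i) := by
  refine List.ext_getElem (by simp) ?_
  intro i h1 h2
  have hi : i < (PySem.List.pyRange 0 (m : Int) 1).length := by
    simpa using h2
  rw [List.getElem_set]
  by_cases hk : k.toNat = i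
  · rw [if_pos hk, List.getElem_map, PySem.List.getElem_pyRange_one _ _ _ hi,
      if_pos (by omega : (0 : Int) + (i : Nat) = k)]
  · rw [if_neg hk, List.getElem_map, List.getElem_map,
      PySem.List.getElem_pyRange_one _ _ _ hi,
      if_neg (by omega : ¬ (0 : Int) + (i : Nat) = k)]

lemma pvTab_row (hn wn : Nat) (f : Int → Int → Int) (x : Int)
    (hx1 : 0 ≤ x) (hx2 : x < (hn : Int)) :
    (pvTab hn wn f).getD x.toNat [] = (PySem.List.pyRange 0 (wn : Int) 1).map (fun c => f x c) := by
  unfold pvTab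
  have hx : x.toNat < ((PySem.List.pyRange 0 (hn : Int) 1).map (fun r =>
      (PySem.List.pyRange 0 (wn : Int) 1).map (fun c => f r c))).length := by
    simp
    omega
  rw [List.getD_eq_getElem _ _ hx, List.getElem_map]
  have hx2' : x.toNat < (PySem.List.pyRange 0 (hn : Int) 1).length := by
    simpa using hx
  rw [PySem.List.getElem_pyRange_one _ _ _ hx2']
  have hxx : (0 : Int) + (x.toNat : Int) = x := by omega
  rw [hxx]

lemma pvSet2_tab (hn wn : Nat) (f : Int → Int → Int) (x y u : Int)
    (hx1 : 0 ≤ x) (hx2 : x < (hn : Int)) (hy1 : 0 ≤ y) (hy2 : y < (wn : Int)) :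
    pvSet2 (pvTab hn wn f) x y u
      = pvTab hn wn (fun r c => if r = x ∧ c = y then u else f r c) := by
  unfold pvSet2
  rw [pvTab_row hn wn f x hx1 hx2]
  rw [pvMap_pyRange_set wn (fun c => f x c) y hy1 hy2 u]
  show ((PySem.List.pyRange 0 (hn : Int) 1).map (fun r =>
      (PySem.List.pyRange 0 (wn : Int) 1).map (fun c => f r c))).set x.toNat _ = _
  rw [pvMap_pyRange_set hn (fun r => (PySem.List.pyRange 0 (wn : Int) 1).map (fun c => f r c))
    x hx1 hx2 _]
  unfold pvTab
  refine List.map_congr_left ?_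
  intro r hrm
  by_cases hrx : r = x
  · rw [if_pos hrx]
    subst hrx
    refine List.map_congr_left ?_
    intro c hcm
    by_cases hcy : c = y
    · simp [hcy]
    · simp [hcy]
  · rw [if_neg hrx]
    refine List.map_congr_left ?_
    intro c hcm
    simp [hrx]

lemma pvInnerMark (g : List (List Int)) (hn wn : Nat) (r : Int)
    (hr1 : 0 ≤ r) (hr2 : r < (hn : Int)) (f : Int → Int → Int) :
    ∀ (m : Nat), m ≤ wn →
    (PySem.List.pyRange 0 (m : Int) 1).foldl (fun o c =>
        if pvGet2 g r c = 8 then pvSet2 o r c 8 else o) (pvTab hn wn f)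
      = pvTab hn wn (fun r' c' =>
          if r' = r ∧ c' < (m : Int) ∧ pvGet2 g r' c' = 8 then 8 else f r' c') := by
  intro m
  induction m with
  | zero =>
      intro _
      simp only [Nat.cast_zero]
      rw [PySem.List.pyRange_one_eq_nil (by omega)]
      simp only [List.foldl_nil]
      refine pvTab_congr hn wn _ _ ?_
      intro r' c' h1 h2 h3 h4
      rw [if_neg (by rintro ⟨-, hlt, -⟩; omega)]
  | succ m ihm =>
      intro hm
      have hcast : ((m + 1 : Nat) : Int) = (m : Int) + 1 := by push_cast; ring
      rw [hcast, PySem.List.pyRange_one_succ_right (by omega), List.foldl_append, ihm (by omega)]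
      simp only [List.foldl_cons, List.foldl_nil]
      by_cases hg8 : pvGet2 g r (m : Int) = 8
      · rw [if_pos hg8,
          pvSet2_tab hn wn _ r (m : Int) 8 hr1 hr2 (by omega) (by exact_mod_cast Nat.cast_lt.2 (by omega))]
        refine pvTab_congr hn wn _ _ ?_
        intro r' c' h1 h2 h3 h4
        by_cases hca : r' = r ∧ c' = (m : Int)
        · rw [if_pos hca, if_pos ⟨hca.1, by omega, by rw [hca.1, hca.2]; exact hg8⟩]
        · rw [if_neg hca]
          by_cases hcb : r' = r ∧ c' < (m : Int) ∧ pvGet2 g r' c' = 8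
          · rw [if_pos hcb, if_pos ⟨hcb.1, by omega, hcb.2.2⟩]
          · rw [if_neg hcb, if_neg ?_]
            rintro ⟨ha, hb, hc⟩
            by_cases hcm : c' = (m : Int)
            · exact hca ⟨ha, hcm⟩
            · exact hcb ⟨ha, by omega, hc⟩
      · rw [if_neg hg8]
        refine pvTab_congr hn wn _ _ ?_
        intro r' c' h1 h2 h3 h4
        by_cases hcb : r' = r ∧ c' < (m : Int) ∧ pvGet2 g r' c' = 8
        · rw [if_pos hcb, if_pos ⟨hcb.1, by omega, hcb.2.2⟩]
        · rw [if_neg hcb, if_neg ?_]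
          rintro ⟨ha, hb, hc⟩
          by_cases hcm : c' = (m : Int)
          · refine absurd ?_ hg8
            rw [← ha, ← hcm]
            exact hc
          · exact hcb ⟨ha, by omega, hc⟩

lemma pvOuterMark (g : List (List Int)) (hn wn : Nat) :
    ∀ (m : Nat), m ≤ hn →
    (PySem.List.pyRange 0 (m : Int) 1).foldl (fun o r =>
        (PySem.List.pyRange 0 (wn : Int) 1).foldl (fun o c =>
          if pvGet2 g r c = 8 then pvSet2 o r c 8 else o) o)
      (pvTab hn wn (fun _ _ => 7))
      = pvTab hn wn (fun r c => if r < (m : Int) ∧ pvGet2 g r c = 8 then 8 else 7) := by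
  intro m
  induction m with
  | zero =>
      intro _
      have hz : PySem.List.pyRange 0 (((0 : Nat) : Int)) 1 = [] :=
        PySem.List.pyRange_one_eq_nil (by omega)
      rw [hz]
      simp only [List.foldl_nil]
      refine pvTab_congr hn wn _ _ ?_
      intro r' c' h1 h2 h3 h4
      rw [if_neg (by rintro ⟨hlt, -⟩; omega)]
  | succ m ihm =>
      intro hm
      have hcast : ((m + 1 : Nat) : Int) = (m : Int) + 1 := by push_cast; ring
      rw [hcast, PySem.List.pyRange_one_succ_right (by omega), List.foldl_append, ihm (by omega)]
      simp only [List.foldl_cons, List.foldl_nil]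
      rw [pvInnerMark g hn wn (m : Int) (by omega) (by omega)
        (fun r c => if r < (m : Int) ∧ pvGet2 g r c = 8 then 8 else 7) wn (le_refl wn)]
      refine pvTab_congr hn wn _ _ ?_
      intro r' c' h1 h2 h3 h4
      by_cases hca : r' = (m : Int)
      · by_cases hg8 : pvGet2 g r' c' = 8
        · rw [if_pos ⟨hca, by omega, hg8⟩, if_pos ⟨by omega, hg8⟩]
        · rw [if_neg (by tauto), if_neg (by tauto), if_neg (by tauto)]
      · rw [if_neg (by tauto)]
        by_cases hcb : r' < (m : Int) ∧ pvGet2 g r' c' = 8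
        · rw [if_pos hcb, if_pos ⟨by omega, hcb.2⟩]
        · rw [if_neg hcb, if_neg (by
            rintro ⟨hlt, h8⟩
            exact hcb ⟨by omega, h8⟩)]

lemma pvInit_eq (g : List (List Int)) (hn wn : Nat) :
    (PySem.List.pyRange 0 (hn : Int) 1).foldl (fun o r =>
        (PySem.List.pyRange 0 (wn : Int) 1).foldl (fun o c =>
          if pvGet2 g r c = 8 then pvSet2 o r c 8 else o) o)
      (List.replicate hn (List.replicate wn 7))
      = pvOut0 g hn wn := by
  rw [pvTab_const hn wn 7, pvOuterMark g hn wn hn (le_refl hn)]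
  show _ = pvTab hn wn (fun r c => if pvGet2 g r c = 8 then (8 : Int) else 7)
  refine pvTab_congr hn wn _ _ ?_
  intro r c h1 h2 h3 h4
  by_cases hg8 : pvGet2 g r c = 8
  · rw [if_pos ⟨h2, hg8⟩, if_pos hg8]
  · rw [if_neg (by tauto), if_neg hg8]

lemma pvGetV_replicate (hn wn : Nat) (x y : Int) :
    pvGetV (List.replicate hn (List.replicate wn false)) x y = false := by
  unfold pvGetV
  simp only [List.getD_eq_getElem?_getD, List.getElem?_replicate]
  by_cases hx : x.toNat < hn
  · simp only [hx, if_true]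
    by_cases hy : y.toNat < wn <;> simp [hy]
  · simp [hx]

lemma pvShape_replicate (hn wn : Nat) :
    pvShape hn wn (List.replicate hn (List.replicate wn false)) := by
  constructor
  · simp
  · intro row hrow
    rw [List.eq_of_mem_replicate hrow]
    simp

lemma pvMain (grid : List (List Int)) : transform grid = transform_alt grid := by
  by_cases h0 : grid.length = 0
  · simp [transform, transform_alt, h0]
  · unfold transform transform_alt
    rw [if_neg h0, if_neg h0]
    dsimp only
    rw [pvFoldl_flatMap]
    simp only [List.foldl_map]
    refine (pvFoldlRel (pvRel2 grid grid.length (grid.headD []).length) _ _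
        (PySem.List.pyRange 0 (grid.length : Int) 1) _ _
        (⟨by
            simp only [List.foldl_nil]
            exact pvInit_eq grid grid.length (grid.headD []).length,
          pvShape_replicate grid.length (grid.headD []).length,
          by
            intro p hp
            rw [pvGetV_replicate]
            simp [PySem.Set.empty]⟩) ?_).1
    intro r hr s1 t1 h1
    have hrb := PySem.List.mem_pyRange_one.1 hr
    refine pvFoldlRel (pvRel2 grid grid.length (grid.headD []).length) _ _
        (PySem.List.pyRange 0 ((grid.headD []).length : Int) 1) s1 t1 h1 ?_
    intro c hc s2 t2 h2
    have hcb := PySem.List.mem_pyRange_one.1 hc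
    exact pvStepAB grid grid.length (grid.headD []).length r c
      (by omega) (by omega) (by omega) (by omega) s2 t2 h2

-- ===== VERDICT (by name: the statement is the Claim_ definition above) =====
theorem transform_spec : Claim_equal_transform := by
  intro grid _hdom _hpre
  unfold Spec_transform
  exact pvMain grid
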